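-- pv_equiv track=rewrite | github.com/Ryo-not-rio/MusicAi | midi_stuff.py | unconvert_matrix
-- ===== SOURCE A (Python) =====
-- def unconvert_matrix(sequence_list):
--     notes = []
--     playing = [0]*127
--     time = 0
--     for matrix in sequence_list:
--         for i, v in enumerate(matrix):
--             count = 0
--             if v == 2:
--                 notes.append([i, 80, time])
--                 playing[i] += 1
--                 time = 0
--                 count += 1
--
--             elif v == 0 and playing[i]:
--                 notes.append([i, 0, time])
--                 playing[i] -= 1
--                 time = 0
--                 count += 1
--
--         time += 1
--     return notes
-- ===== SOURCE B (Python) =====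
-- def unconvert_matrix(sequence_list):
--     # First pass: detect note on/off events as (matrix_index, note, velocity),
--     # tracking only how many times each note is currently playing.
--     events = []
--     playing = {}
--     for m, matrix in enumerate(sequence_list):
--         for i, v in enumerate(matrix):
--             if v == 2:
--                 events.append((m, i, 80))
--                 playing[i] = playing.get(i, 0) + 1
--             elif v == 0 and playing.get(i, 0):
--                 events.append((m, i, 0))
--                 playing[i] = playing.get(i, 0) - 1
--     # Second pass: turn absolute matrix indices into time deltas.
--     notes = []
--     last_m = 0
--     for m, i, vel in events:
--         notes.append([i, vel, m - last_m])
--         last_m = m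
--     return notes
-- ===== Notes on version B (the rewrite author's own statement) =====
-- stated objective: alternative
-- what changed: Replaces A's single scan with interleaved time/state bookkeeping (fixed 127-slot playing list, time counter reset inside the loop) by two passes: an event-detection pass that records (matrix_index, note, velocity) with a dict of playing counts, then a separate pass that converts absolute matrix indices into delta times; the dead `count` variable is dropped.
import Mathlib
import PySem

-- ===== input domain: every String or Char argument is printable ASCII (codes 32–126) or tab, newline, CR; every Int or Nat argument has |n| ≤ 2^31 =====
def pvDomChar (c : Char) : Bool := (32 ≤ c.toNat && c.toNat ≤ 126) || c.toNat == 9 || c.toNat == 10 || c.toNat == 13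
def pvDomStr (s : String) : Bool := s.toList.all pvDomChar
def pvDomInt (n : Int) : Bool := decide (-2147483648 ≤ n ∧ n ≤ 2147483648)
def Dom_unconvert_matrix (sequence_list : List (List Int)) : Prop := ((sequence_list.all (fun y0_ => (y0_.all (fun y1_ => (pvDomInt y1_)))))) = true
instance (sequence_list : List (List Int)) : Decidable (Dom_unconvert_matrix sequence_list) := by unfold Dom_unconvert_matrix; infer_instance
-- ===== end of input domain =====

-- B replaces A's interleaved time/state scan by two passes: an event-detection
-- pass with a dict of playing counts, then a separate delta-time pass over the
-- collected events (objective: alternative decomposition, same cost).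

-- ===== PORT A =====
-- one step of A's inner 'for i, v in enumerate(matrix)' loop, state (notes, playing, time)
def aInner (st : List (List Int) × List Int × Int) (q : Int × Int) :
    List (List Int) × List Int × Int :=
  let notes := st.1
  let playing := st.2.1
  let time := st.2.2
  let i := q.1
  let v := q.2
  if v = 2 then
    (notes ++ [[i, 80, time]],
     PySem.List.pySetD playing i (PySem.List.pyGetD playing i 0 + 1), 0)
  else if v = 0 ∧ PySem.List.pyGetD playing i 0 ≠ 0 then
    (notes ++ [[i, 0, time]],
     PySem.List.pySetD playing i (PySem.List.pyGetD playing i 0 - 1), 0)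
  else st

-- one iteration of A's outer 'for matrix in sequence_list' loop (inner loop, then time += 1)
def aOuter (st : List (List Int) × List Int × Int) (matrix : List Int) :
    List (List Int) × List Int × Int :=
  let st' := (PySem.List.enumerate matrix 0).foldl aInner st
  (st'.1, st'.2.1, st'.2.2 + 1)

def unconvert_matrix (sequence_list : List (List Int)) : List (List Int) :=
  (sequence_list.foldl aOuter ([], List.replicate 127 0, 0)).1

-- ===== PORT B =====
-- one step of B's inner detection loop at matrix index m, state (events, playing dict)
def bStep (m : Int) (st : List (Int × Int × Int) × PySem.Dict Int Int) (q : Int × Int) :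
    List (Int × Int × Int) × PySem.Dict Int Int :=
  let events := st.1
  let playing := st.2
  let i := q.1
  let v := q.2
  if v = 2 then
    (events ++ [(m, i, 80)], playing.insert i (playing.getD i 0 + 1))
  else if v = 0 ∧ playing.getD i 0 ≠ 0 then
    (events ++ [(m, i, 0)], playing.insert i (playing.getD i 0 - 1))
  else st

-- B's first pass body: 'for m, matrix in enumerate(sequence_list): for i, v in enumerate(matrix): …'
def bDetect (st : List (Int × Int × Int) × PySem.Dict Int Int) (p : Int × List Int) :
    List (Int × Int × Int) × PySem.Dict Int Int :=
  (PySem.List.enumerate p.2 0).foldl (bStep p.1) st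

-- B's second pass body: state (notes, last_m), emits [i, vel, m - last_m]
def bEmit (acc : List (List Int) × Int) (e : Int × Int × Int) : List (List Int) × Int :=
  (acc.1 ++ [[e.2.1, e.2.2, e.1 - acc.2]], e.1)

def unconvert_matrix_alt (sequence_list : List (List Int)) : List (List Int) :=
  let events := ((PySem.List.enumerate sequence_list 0).foldl bDetect
      ([], PySem.Dict.empty)).1
  (events.foldl bEmit ([], 0)).1

-- ===== PRECONDITION & SPEC =====
-- Pre_ excludes exactly the inputs on which A raises IndexError: a matrix entry 2 or 0
-- at an index ≥ 127, where A accesses playing[i] beyond its fixed length 127.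
def Pre_unconvert_matrix (sequence_list : List (List Int)) : Prop :=
  ∀ matrix ∈ sequence_list, ∀ v ∈ matrix.drop 127, ¬(v = 2 ∨ v = 0)
instance (sequence_list : List (List Int)) : Decidable (Pre_unconvert_matrix sequence_list) := by
  unfold Pre_unconvert_matrix; infer_instance

def pvWitness_unconvert_matrix : List (List Int) := [[2, 1, 0], [], [0, 0, 2]]

def Spec_unconvert_matrix (sequence_list : List (List Int)) (out : List (List Int)) : Prop :=
  out = unconvert_matrix_alt sequence_list
instance (sequence_list : List (List Int)) (out : List (List Int)) : Decidable (Spec_unconvert_matrix sequence_list out) := by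
  unfold Spec_unconvert_matrix; infer_instance

-- ===== CLAIM (what is proved, stated in full; the proofs are below) =====
def Claim_equal_unconvert_matrix : Prop := ∀ (sequence_list : List (List Int)), Dom_unconvert_matrix sequence_list → Pre_unconvert_matrix sequence_list → Spec_unconvert_matrix sequence_list (unconvert_matrix sequence_list)

-- ===== LEMMAS AND PROOFS =====

-- membership in enumerate: every pair is (s + k, xs.getD k 0) for some in-range k
lemma mem_enumerate_elim {α : Type} [Inhabited α] (xs : List α) :
    ∀ (s : Int) (q : Int × α), q ∈ PySem.List.enumerate xs s →
      ∃ k : Nat, k < xs.length ∧ q.1 = s + k ∧ q.2 = xs.getD k default := by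
  induction xs with
  | nil => intro s q h; simp [PySem.List.enumerate_nil] at h
  | cons x xs ih =>
    intro s q h
    rw [PySem.List.enumerate_cons] at h
    rcases List.mem_cons.mp h with h | h
    · exact ⟨0, by simp [h]⟩
    · obtain ⟨k, hk, h1, h2⟩ := ih (s + 1) q h
      exact ⟨k + 1, by simpa using hk, by omega, by simpa using h2⟩

-- read/write of A's playing list vs. Python semantics, at nonnegative Int indices
lemma pyGetD_pySetD_int (xs : List Int) (i j v : Int) (hi : 0 ≤ i) (hilt : i < (xs.length : Int))
    (hj : 0 ≤ j) :
    PySem.List.pyGetD (PySem.List.pySetD xs i v) j 0 =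
      if j = i then v else PySem.List.pyGetD xs j 0 := by
  rw [PySem.List.pySetD_of_nonneg xs v hi]
  by_cases hjl : j < (xs.length : Int)
  · rw [PySem.List.pyGetD_eq_getElem (xs.set i.toNat v) 0 hj (by simpa [List.length_set] using hjl),
        PySem.List.pyGetD_eq_getElem xs 0 hj hjl]
    rw [List.getElem_set]
    split_ifs with h1 h2 h2
    · rfl
    · omega
    · omega
    · rfl
  · have h1 : ¬ PySem.Raise.InRange xs.length j := by
      simp [PySem.Raise.InRange]; omega
    have h2 : ¬ PySem.Raise.InRange (xs.set i.toNat v).length j := by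
      simp [PySem.Raise.InRange, List.length_set]; omega
    rw [PySem.List.pyGetD_of_none _ _ _ ((PySem.List.pyGet?_eq_none_iff _ _).2 h2),
        PySem.List.pyGetD_of_none _ _ _ ((PySem.List.pyGet?_eq_none_iff _ _).2 h1)]
    have : j ≠ i := by omega
    simp [this]

lemma pyGetD_replicate_zero (i : Int) (hi : 0 ≤ i) :
    PySem.List.pyGetD (List.replicate 127 (0 : Int)) i 0 = 0 := by
  by_cases hil : i < ((List.replicate 127 (0 : Int)).length : Int)
  · rw [PySem.List.pyGetD_eq_getElem _ 0 hi hil]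
    simp only [List.getElem_replicate]
  · rw [PySem.List.pyGetD_of_none _ _ _ ((PySem.List.pyGet?_eq_none_iff _ _).2 (by
      simp [PySem.Raise.InRange]
      simp at hil
      omega))]

-- the inner loops agree: A's notes/time are B's second pass over B's events
lemma inner_agree (ps : List (Int × Int)) (m : Int)
    (events : List (Int × Int × Int)) (pa : List Int) (pb : PySem.Dict Int Int)
    (hps : ∀ q ∈ ps, 0 ≤ q.1 ∧ ((q.2 = 2 ∨ q.2 = 0) → q.1 < 127))
    (hlen : pa.length = 127)
    (hrel : ∀ i : Int, 0 ≤ i → PySem.List.pyGetD pa i 0 = pb.getD i 0) :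
    let ra := ps.foldl aInner
      ((events.foldl bEmit ([], 0)).1, pa, m - (events.foldl bEmit ([], 0)).2)
    let rb := ps.foldl (bStep m) (events, pb)
    ra.1 = (rb.1.foldl bEmit ([], 0)).1 ∧
    ra.2.2 = m - (rb.1.foldl bEmit ([], 0)).2 ∧
    ra.2.1.length = 127 ∧
    (∀ i : Int, 0 ≤ i → PySem.List.pyGetD ra.2.1 i 0 = rb.2.getD i 0) := by
  induction ps generalizing events pa pb with
  | nil => exact ⟨rfl, rfl, hlen, hrel⟩
  | cons q ps ih =>
    obtain ⟨hq0, hq127⟩ := hps q (by simp)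
    have hps' : ∀ q ∈ ps, 0 ≤ q.1 ∧ ((q.2 = 2 ∨ q.2 = 0) → q.1 < 127) :=
      fun q hq => hps q (by simp [hq])
    simp only [List.foldl_cons]
    by_cases h2 : q.2 = 2
    · -- note-on event
      have hlt : q.1 < 127 := hq127 (Or.inl h2)
      have hstepA : aInner ((events.foldl bEmit ([], 0)).1, pa,
          m - (events.foldl bEmit ([], 0)).2) q =
          (((events ++ [(m, q.1, 80)]).foldl bEmit ([], 0)).1,
           PySem.List.pySetD pa q.1 (PySem.List.pyGetD pa q.1 0 + 1),
           m - ((events ++ [(m, q.1, 80)]).foldl bEmit ([], 0)).2) := by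
        simp [aInner, h2, bEmit, List.foldl_append]
      have hstepB : bStep m (events, pb) q =
          (events ++ [(m, q.1, 80)], pb.insert q.1 (pb.getD q.1 0 + 1)) := by
        simp [bStep, h2]
      rw [hstepA, hstepB]
      refine ih _ _ _ hps' (by simp [PySem.List.length_pySetD, hlen]) ?_
      intro i hi
      rw [pyGetD_pySetD_int pa q.1 i _ hq0 (by omega) hi, PySem.Dict.getD_insert]
      split_ifs with hiq
      · rw [hrel q.1 hq0]
      · exact hrel i hi
    · by_cases h0 : q.2 = 0 ∧ PySem.List.pyGetD pa q.1 0 ≠ 0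
      · -- note-off event
        have hlt : q.1 < 127 := hq127 (Or.inr h0.1)
        have h0' : q.2 = 0 ∧ pb.getD q.1 0 ≠ 0 := ⟨h0.1, by rw [← hrel q.1 hq0]; exact h0.2⟩
        have hstepA : aInner ((events.foldl bEmit ([], 0)).1, pa,
            m - (events.foldl bEmit ([], 0)).2) q =
            (((events ++ [(m, q.1, 0)]).foldl bEmit ([], 0)).1,
             PySem.List.pySetD pa q.1 (PySem.List.pyGetD pa q.1 0 - 1),
             m - ((events ++ [(m, q.1, 0)]).foldl bEmit ([], 0)).2) := by
          simp [aInner, h0, bEmit, List.foldl_append]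
        have hstepB : bStep m (events, pb) q =
            (events ++ [(m, q.1, 0)], pb.insert q.1 (pb.getD q.1 0 - 1)) := by
          simp [bStep, h0']
        rw [hstepA, hstepB]
        refine ih _ _ _ hps' (by simp [PySem.List.length_pySetD, hlen]) ?_
        intro i hi
        rw [pyGetD_pySetD_int pa q.1 i _ hq0 (by omega) hi, PySem.Dict.getD_insert]
        split_ifs with hiq
        · rw [hrel q.1 hq0]
        · exact hrel i hi
      · -- no event
        have h0' : ¬ (q.2 = 0 ∧ pb.getD q.1 0 ≠ 0) := by
          intro hc; exact h0 ⟨hc.1, by rw [hrel q.1 hq0]; exact hc.2⟩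
        have hstepA : aInner ((events.foldl bEmit ([], 0)).1, pa,
            m - (events.foldl bEmit ([], 0)).2) q =
            ((events.foldl bEmit ([], 0)).1, pa, m - (events.foldl bEmit ([], 0)).2) := by
          simp [aInner, h2, h0]
        have hstepB : bStep m (events, pb) q = (events, pb) := by
          simp [bStep, h2, h0']
        rw [hstepA, hstepB]
        exact ih _ _ _ hps' hlen hrel

-- the outer loops agree, starting at matrix index m
set_option maxRecDepth 4096 in
lemma outer_agree (ms : List (List Int)) (m : Int)
    (events : List (Int × Int × Int)) (pa : List Int) (pb : PySem.Dict Int Int)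
    (hpre : ∀ matrix ∈ ms, ∀ v ∈ matrix.drop 127, ¬(v = 2 ∨ v = 0))
    (hlen : pa.length = 127)
    (hrel : ∀ i : Int, 0 ≤ i → PySem.List.pyGetD pa i 0 = pb.getD i 0) :
    (ms.foldl aOuter
      ((events.foldl bEmit ([], 0)).1, pa, m - (events.foldl bEmit ([], 0)).2)).1 =
    ((((PySem.List.enumerate ms m).foldl bDetect (events, pb)).1).foldl bEmit ([], 0)).1 := by
  induction ms generalizing m events pa pb with
  | nil => simp [PySem.List.enumerate_nil]
  | cons matrix ms ih =>
    rw [PySem.List.enumerate_cons]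
    simp only [List.foldl_cons]
    have hps : ∀ q ∈ PySem.List.enumerate matrix 0, 0 ≤ q.1 ∧ ((q.2 = 2 ∨ q.2 = 0) → q.1 < 127) := by
      intro q hq
      obtain ⟨k, hk, h1, h2⟩ := mem_enumerate_elim matrix 0 q hq
      refine ⟨by omega, ?_⟩
      intro hv
      by_contra hge
      have hge' : 127 ≤ k := by omega
      have hmem : q.2 ∈ matrix.drop 127 := by
        rw [h2, List.getD_eq_getElem matrix default hk]
        rw [List.mem_iff_getElem]
        have hk' : k - 127 < (matrix.drop 127).length := by
          rw [List.length_drop]; omega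
        exact ⟨k - 127, hk', by rw [List.getElem_drop]; congr 1; omega⟩
      exact hpre matrix (by simp) q.2 hmem hv
    have hinner := inner_agree (PySem.List.enumerate matrix 0) m events pa pb hps hlen hrel
    obtain ⟨e1, e2, e3, e4⟩ := hinner
    set ra := (PySem.List.enumerate matrix 0).foldl aInner
      ((events.foldl bEmit ([], 0)).1, pa, m - (events.foldl bEmit ([], 0)).2) with hra
    set rb := (PySem.List.enumerate matrix 0).foldl (bStep m) (events, pb) with hrb
    have houter : aOuter ((events.foldl bEmit ([], 0)).1, pa,
        m - (events.foldl bEmit ([], 0)).2) matrix = (ra.1, ra.2.1, ra.2.2 + 1) := rfl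
    rw [houter]
    have hdet : bDetect (events, pb) (m, matrix) = rb := rfl
    rw [hdet]
    have htime : ra.2.2 + 1 = (m + 1) - (rb.1.foldl bEmit ([], 0)).2 := by omega
    have hnotes : ra.1 = (rb.1.foldl bEmit ([], 0)).1 := e1
    have hrw : (ra.1, ra.2.1, ra.2.2 + 1) =
        ((rb.1.foldl bEmit ([], 0)).1, ra.2.1, (m + 1) - (rb.1.foldl bEmit ([], 0)).2) := by
      rw [hnotes, htime]
    rw [hrw]
    have hpre' : ∀ matrix ∈ ms, ∀ v ∈ matrix.drop 127, ¬(v = 2 ∨ v = 0) :=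
      fun mx hmx => hpre mx (by simp [hmx])
    have hrb2 : rb.2 = (bDetect (events, pb) (m, matrix)).2 := rfl
    have := ih (m + 1) rb.1 ra.2.1 rb.2 hpre' e3 e4
    convert this using 3

-- ===== VERDICT (by name: the statement is the Claim_ definition above) =====
theorem unconvert_matrix_spec : Claim_equal_unconvert_matrix := by
  intro sequence_list _hdom hpre
  unfold Spec_unconvert_matrix unconvert_matrix unconvert_matrix_alt
  have := outer_agree sequence_list 0 [] (List.replicate 127 0) PySem.Dict.empty
    hpre (by simp)
    (fun i hi => by rw [pyGetD_replicate_zero i hi]; rfl)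
  simpa using this
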